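-- pv_equiv track=rewrite | github.com/r79007/IQB-Assignments | Assignment-1/Q4b.py | find_max_indices
-- ===== SOURCE A (Python) =====
-- def find_max_indices(arr,seq1,seq2):
--
--     max_score=float('-inf')
--     max_i=-1
--     max_j=-1
--
--     for i in range(len(seq1)+1):
--         for j in range(len(seq2)+1):
--             if(max_score<arr[i][j]):
--                 max_score=arr[i][j]
--                 max_i=i
--                 max_j=j
--
--     return (max_i,max_j)
-- ===== SOURCE B (Python) =====
-- def find_max_indices(arr, seq1, seq2):
--     # Two-pass decomposition: per-row best summaries, then a selection pass.
--     rows = len(seq1) + 1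
--     cols = len(seq2) + 1
--     summaries = []
--     for i in range(rows):
--         row = arr[i]
--         best = float('-inf')
--         best_j = -1
--         for j in range(cols):
--             if best < row[j]:
--                 best = row[j]
--                 best_j = j
--         summaries.append((best, best_j))
--     max_score = float('-inf')
--     max_i = -1
--     max_j = -1
--     for i, (v, j) in enumerate(summaries):
--         if max_score < v:
--             max_score = v
--             max_i = i
--             max_j = j
--     return (max_i, max_j)
-- ===== Notes on version B (the rewrite author's own statement) =====
-- stated objective: alternative
-- what changed: A's single nested scan is split into a row-summary pass (first maximum of each row) followed by a selection pass over the summaries; Pre_ excludes inputs where A raises IndexError (arr smaller than (len(seq1)+1) x (len(seq2)+1)).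
import Mathlib
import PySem

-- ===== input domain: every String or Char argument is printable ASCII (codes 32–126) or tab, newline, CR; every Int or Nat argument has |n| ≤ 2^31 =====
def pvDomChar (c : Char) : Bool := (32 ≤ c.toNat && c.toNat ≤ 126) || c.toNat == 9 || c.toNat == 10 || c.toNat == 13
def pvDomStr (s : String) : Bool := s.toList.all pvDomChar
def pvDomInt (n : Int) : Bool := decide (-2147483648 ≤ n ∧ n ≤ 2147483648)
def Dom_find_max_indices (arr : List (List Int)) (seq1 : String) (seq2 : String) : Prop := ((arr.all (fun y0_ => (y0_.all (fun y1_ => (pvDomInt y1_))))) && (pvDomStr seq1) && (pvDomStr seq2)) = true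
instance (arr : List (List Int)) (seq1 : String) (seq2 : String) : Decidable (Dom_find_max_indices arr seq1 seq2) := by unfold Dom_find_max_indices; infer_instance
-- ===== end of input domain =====

-- B replaces A's single nested first-maximum scan by a per-row summary pass plus a selection pass (alternative decomposition, same cost).


-- ===== PORT A =====
-- 'max_score < x' with max_score starting at float('-inf'): none models -inf, always below any int
def pvLt : Option Int → Int → Bool
  | none, _ => true
  | some a, b => decide (a < b)

def find_max_indices (arr : List (List Int)) (seq1 : String) (seq2 : String) : Int × Int :=
  let st := (PySem.List.pyRange 0 (PySem.Str.len seq1 + 1) 1).foldl (fun st i =>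
    (PySem.List.pyRange 0 (PySem.Str.len seq2 + 1) 1).foldl (fun st j =>
      let v := PySem.List.pyGetD (PySem.List.pyGetD arr i []) j 0
      if pvLt st.1 v then (some v, i, j) else st) st)
    ((none : Option Int), (-1 : Int), (-1 : Int))
  (st.2.1, st.2.2)

-- ===== PORT B =====
-- '-inf < -inf' is false in Python: pvLtO compares two possibly -inf values
def pvLtO : Option Int → Option Int → Bool
  | _, none => false
  | none, some _ => true
  | some a, some b => decide (a < b)

-- inner column scan of one row: (row best, index of its first occurrence)
def pvRowBest (row : List Int) (cols : Int) : Option Int × Int :=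
  (PySem.List.pyRange 0 cols 1).foldl (fun st j =>
    let v := PySem.List.pyGetD row j 0
    if pvLt st.1 v then (some v, j) else st) ((none : Option Int), (-1 : Int))

def find_max_indices_alt (arr : List (List Int)) (seq1 : String) (seq2 : String) : Int × Int :=
  let rows := PySem.Str.len seq1 + 1
  let cols := PySem.Str.len seq2 + 1
  let summaries := (PySem.List.pyRange 0 rows 1).map (fun i =>
    pvRowBest (PySem.List.pyGetD arr i []) cols)
  let r := (PySem.List.enumerate summaries).foldl (fun st p =>
    if pvLtO st.1 p.2.1 then (p.2.1, p.1, p.2.2) else st)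
    ((none : Option Int), (-1 : Int), (-1 : Int))
  (r.2.1, r.2.2)

-- ===== PRECONDITION & SPEC =====
-- Pre_ excludes exactly the inputs on which Python A raises IndexError: arr must have at
-- least len(seq1)+1 rows, each of the first len(seq1)+1 rows at least len(seq2)+1 long.
def Pre_find_max_indices (arr : List (List Int)) (seq1 : String) (seq2 : String) : Prop :=
  seq1.toList.length + 1 ≤ arr.length ∧
  ∀ row ∈ arr.take (seq1.toList.length + 1), seq2.toList.length + 1 ≤ row.length

instance (arr : List (List Int)) (seq1 : String) (seq2 : String) : Decidable (Pre_find_max_indices arr seq1 seq2) := by unfold Pre_find_max_indices; infer_instance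

def pvWitness_find_max_indices : List (List Int) × String × String := ([[1, 2], [3, 0]], "a", "b")

def Spec_find_max_indices (arr : List (List Int)) (seq1 : String) (seq2 : String) (out : Int × Int) : Prop := out = find_max_indices_alt arr seq1 seq2
instance (arr : List (List Int)) (seq1 : String) (seq2 : String) (out : Int × Int) : Decidable (Spec_find_max_indices arr seq1 seq2 out) := by unfold Spec_find_max_indices; infer_instance

-- ===== CLAIM (what is proved, stated in full; the proofs are below) =====
def Claim_equal_find_max_indices : Prop := ∀ (arr : List (List Int)) (seq1 : String) (seq2 : String), Dom_find_max_indices arr seq1 seq2 → Pre_find_max_indices arr seq1 seq2 → Spec_find_max_indices arr seq1 seq2 (find_max_indices arr seq1 seq2)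

-- ===== LEMMAS AND PROOFS =====

-- selection step: fold a row summary (b, bj) for row i into the global state
def pvComb (st : Option Int × Int × Int) (b : Option Int × Int) (i : Int) : Option Int × Int × Int :=
  if pvLtO st.1 b.1 then (b.1, i, b.2) else st

lemma pvStep (row : List Int) (i j : Int) (st : Option Int × Int × Int) (b : Option Int × Int) :
    (let v := PySem.List.pyGetD row j 0;
     if pvLt (pvComb st b i).1 v then (some v, i, j) else pvComb st b i)
    = pvComb st (let v := PySem.List.pyGetD row j 0;
                 if pvLt b.1 v then (some v, j) else b) i := by
  obtain ⟨s, mi, mj⟩ := st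
  obtain ⟨bo, bj⟩ := b
  cases s <;> cases bo <;>
    simp [pvComb, pvLt, pvLtO] <;> split_ifs <;> simp_all <;> omega

lemma pvInner (row : List Int) (i : Int) :
    ∀ (js : List Int) (st : Option Int × Int × Int) (b : Option Int × Int),
    js.foldl (fun st j =>
        let v := PySem.List.pyGetD row j 0
        if pvLt st.1 v then (some v, i, j) else st) (pvComb st b i)
    = pvComb st (js.foldl (fun bst j =>
        let v := PySem.List.pyGetD row j 0
        if pvLt bst.1 v then (some v, j) else bst) b) i := by
  intro js
  induction js with
  | nil => intro st b; rfl
  | cons j js ih =>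
    intro st b
    simp only [List.foldl_cons]
    rw [pvStep row i j st b]
    exact ih st _

lemma pvComb_none (st : Option Int × Int × Int) (i : Int) :
    pvComb st (none, -1) i = st := by
  obtain ⟨s, mi, mj⟩ := st; cases s <;> rfl

lemma pvEnumMap {α : Type} (f : Int → α) :
    ∀ (k : Nat) (a : Int),
    PySem.List.enumerate ((PySem.List.pyRange a (a + k) 1).map f) a
    = (PySem.List.pyRange a (a + k) 1).map (fun i => (i, f i)) := by
  intro k
  induction k with
  | zero =>
    intro a
    rw [PySem.List.pyRange_one_eq_nil (by simp)]
    rfl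
  | succ k ih =>
    intro a
    have hc : (a + ((k + 1 : Nat) : Int)) = (a + 1) + (k : Nat) := by push_cast; omega
    rw [hc, PySem.List.pyRange_one_cons (by omega)]
    simp only [List.map_cons, PySem.List.enumerate_cons]
    rw [ih (a + 1)]

-- ===== VERDICT (by name: the statement is the Claim_ definition above) =====
theorem find_max_indices_spec : Claim_equal_find_max_indices := by
  intro arr seq1 seq2 _hdom _hpre
  unfold Spec_find_max_indices find_max_indices find_max_indices_alt
  have hlen : PySem.Str.len seq1 + 1 = ((seq1.toList.length + 1 : Nat) : Int) := by
    rw [PySem.Str.len_eq]; push_cast; omega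
  have henum := pvEnumMap
    (fun i => pvRowBest (PySem.List.pyGetD arr i []) (PySem.Str.len seq2 + 1))
    (seq1.toList.length + 1) 0
  rw [zero_add] at henum
  simp only [hlen]
  have hbody : ∀ (st : Option Int × Int × Int) (i : Int),
      (PySem.List.pyRange 0 (PySem.Str.len seq2 + 1) 1).foldl (fun st j =>
        let v := PySem.List.pyGetD (PySem.List.pyGetD arr i []) j 0
        if pvLt st.1 v then (some v, i, j) else st) st
      = pvComb st (pvRowBest (PySem.List.pyGetD arr i []) (PySem.Str.len seq2 + 1)) i := by
    intro st i
    have h := pvInner (PySem.List.pyGetD arr i []) i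
      (PySem.List.pyRange 0 (PySem.Str.len seq2 + 1) 1) st (none, -1)
    rw [pvComb_none] at h
    exact h
  simp only [henum, List.foldl_map, hbody, pvComb]
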